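-- pv_equiv track=rewrite | github.com/SebaJoe/MultiCochrane | code/anno_viewer/make-alignment-file/json_to_csv.py | create_transformer
-- ===== SOURCE A (Python) =====
-- def sections_to_list(sections):
--     ret = []
--     headings = []
--     for section in sections:
--         ret.append([section["heading"]])
--         headings.append([section["heading"]])
--         ret.append(section["text"])
--     return ret, headings
--
-- def create_transformer(sections):
--     count = 0
--     t_list = []
--     s_list, _ = sections_to_list(sections)
--     for i in range(len(s_list)):
--         for j in range(len(s_list[i])):
--             t_list.append((i, j))
--     return t_list
-- ===== SOURCE B (Python) =====
-- def create_transformer(sections):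
--     # Single pass over sections with a running row counter: each section
--     # contributes a one-element heading row then one pair per text character.
--     pairs = []
--     i = 0
--     for section in sections:
--         pairs.append((i, 0))
--         pairs += [(i + 1, j) for j in range(len(section["text"]))]
--         i += 2
--     return pairs
-- ===== Notes on version B (the rewrite author's own statement) =====
-- stated objective: simpler
-- what changed: B drops the sections_to_list helper and the intermediate row list entirely: one pass over sections with a running row counter emits (i,0) for the heading row and (i+1,j) for each text character, instead of A's build-a-list-of-rows then nested index loops over range(len(...)).
import Mathlib
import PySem

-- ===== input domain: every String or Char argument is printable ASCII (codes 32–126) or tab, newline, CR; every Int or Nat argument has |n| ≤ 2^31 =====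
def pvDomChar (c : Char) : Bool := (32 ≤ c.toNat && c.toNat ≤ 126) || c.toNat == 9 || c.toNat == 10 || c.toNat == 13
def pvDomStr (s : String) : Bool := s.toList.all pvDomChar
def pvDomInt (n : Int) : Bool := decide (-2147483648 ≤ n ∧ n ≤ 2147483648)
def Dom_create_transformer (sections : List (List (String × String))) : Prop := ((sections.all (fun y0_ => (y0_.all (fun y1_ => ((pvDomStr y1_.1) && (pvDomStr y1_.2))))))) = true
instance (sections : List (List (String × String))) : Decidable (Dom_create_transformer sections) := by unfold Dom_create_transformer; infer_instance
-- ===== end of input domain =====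

-- B replaces A's intermediate row list (sections_to_list) plus nested index loops by one
-- pass over the sections with a running row counter (objective: simpler; same asymptotics).

-- ===== PORT A =====
-- Python's s_list mixes one-element lists ([heading]) and strings (text); PvRow makes that
-- heterogeneity explicit, pvRowLen is Python's len() on either kind of row.
inductive PvRow
  | head : String → PvRow
  | text : String → PvRow
deriving DecidableEq, Repr

def pvRowLen : PvRow → Int
  | .head _ => 1
  | .text t => PySem.Str.len t

def sections_to_list (sections : List (List (String × String))) :
    List PvRow × List PvRow :=
  sections.foldl (fun st sec =>
      let h := ((PySem.Dict.mk sec).get? "heading").getD ""   -- KeyError excluded by Pre_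
      let t := ((PySem.Dict.mk sec).get? "text").getD ""      -- KeyError excluded by Pre_
      (st.1 ++ [PvRow.head h] ++ [PvRow.text t], st.2 ++ [PvRow.head h]))
    ([], [])

def create_transformer (sections : List (List (String × String))) : List (Int × Int) :=
  let s_list := (sections_to_list sections).1
  (PySem.List.pyRange 0 (s_list.length : Int) 1).foldl
    (fun t_list i =>
      (PySem.List.pyRange 0 (pvRowLen (PySem.List.pyGetD s_list i (PvRow.head ""))) 1).foldl
        (fun tl j => tl ++ [(i, j)]) t_list)
    []

-- ===== PORT B =====
def create_transformer_alt (sections : List (List (String × String))) : List (Int × Int) :=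
  (sections.foldl (fun (st : List (Int × Int) × Int) sec =>
      let t := ((PySem.Dict.mk sec).get? "text").getD ""      -- KeyError excluded by Pre_
      (st.1 ++ [(st.2, 0)] ++
         (PySem.List.pyRange 0 (PySem.Str.len t) 1).map (fun j => (st.2 + 1, j)),
       st.2 + 2))
    ([], 0)).1

-- ===== PRECONDITION & SPEC =====
-- Pre_ excludes exactly the inputs on which A raises KeyError: a section dict missing
-- the key "heading" or the key "text".
def Pre_create_transformer (sections : List (List (String × String))) : Prop :=
  ∀ sec ∈ sections, ((PySem.Dict.mk sec).get? "heading").isSome = true ∧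
                    ((PySem.Dict.mk sec).get? "text").isSome = true
instance (sections : List (List (String × String))) : Decidable (Pre_create_transformer sections) := by unfold Pre_create_transformer; infer_instance

def pvWitness_create_transformer : (List (List (String × String))) :=
  [[("heading", "h1"), ("text", "ab")], [("heading", "h2"), ("text", "")]]

def Spec_create_transformer (sections : List (List (String × String))) (out : List (Int × Int)) : Prop := out = create_transformer_alt sections
instance (sections : List (List (String × String))) (out : List (Int × Int)) : Decidable (Spec_create_transformer sections out) := by unfold Spec_create_transformer; infer_instance

-- ===== CLAIM (what is proved, stated in full; the proofs are below) =====
def Claim_equal_create_transformer : Prop := ∀ (sections : List (List (String × String))), Dom_create_transformer sections → Pre_create_transformer sections → Spec_create_transformer sections (create_transformer sections)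


-- ===== LEMMAS AND PROOFS =====

-- the pairs emitted for one row of (Python) length n placed at row index i
def pvPairsAt (i n : Int) : List (Int × Int) :=
  (PySem.List.pyRange 0 n 1).map (fun j => (i, j))

-- the whole output, as a function of the flattened row list and a start index
def pvFlatPairs : List PvRow → Int → List (Int × Int)
  | [], _ => []
  | r :: rs, i => pvPairsAt i (pvRowLen r) ++ pvFlatPairs rs (i + 1)

def pvRowsOf (sections : List (List (String × String))) : List PvRow :=
  sections.flatMap (fun sec =>
    [PvRow.head (((PySem.Dict.mk sec).get? "heading").getD ""),
     PvRow.text (((PySem.Dict.mk sec).get? "text").getD "")])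

theorem pvSections_to_list_fst (sections : List (List (String × String)))
    (a b : List PvRow) :
    (sections.foldl (fun st sec =>
        let h := ((PySem.Dict.mk sec).get? "heading").getD ""
        let t := ((PySem.Dict.mk sec).get? "text").getD ""
        (st.1 ++ [PvRow.head h] ++ [PvRow.text t], st.2 ++ [PvRow.head h]))
      (a, b)).1 = a ++ pvRowsOf sections := by
  induction sections generalizing a b with
  | nil => simp [pvRowsOf]
  | cons s rest ih =>
    simp only [List.foldl_cons]
    rw [ih]
    simp [pvRowsOf, List.flatMap_cons]

theorem pvPairsAt_one (i : Int) : pvPairsAt i 1 = [(i, 0)] := by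
  have h : PySem.List.pyRange 0 1 1 = [0] := by decide
  simp [pvPairsAt, h]

-- A's double range loop over a row list equals pvFlatPairs (nat-indexed core)
theorem pvFlat_nat (rows : List PvRow) (off : Int) :
    (List.range rows.length).flatMap
      (fun k : Nat => pvPairsAt (off + (k : Int)) (pvRowLen (rows.getD k (PvRow.head "")))) =
    pvFlatPairs rows off := by
  induction rows generalizing off with
  | nil => simp [pvFlatPairs]
  | cons r rs ih =>
    rw [List.length_cons, List.range_succ_eq_map]
    simp only [List.flatMap_cons, List.flatMap_map]
    have hf : (fun k : Nat =>
        pvPairsAt (off + ((k.succ : Nat) : Int))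
          (pvRowLen ((r :: rs).getD k.succ (PvRow.head "")))) =
        (fun k : Nat =>
          pvPairsAt ((off + 1) + (k : Int)) (pvRowLen (rs.getD k (PvRow.head "")))) := by
      funext k
      simp only [List.getD]
      congr 1
      push_cast; ring
    rw [hf, ih]
    simp [pvFlatPairs]

theorem pvFlatPairs_cons2 (h t : String) (rs : List PvRow) (i : Int) :
    pvFlatPairs (PvRow.head h :: PvRow.text t :: rs) i
      = (i, 0) :: (pvPairsAt (i + 1) (PySem.Str.len t) ++ pvFlatPairs rs (i + 2)) := by
  simp only [pvFlatPairs, pvRowLen, pvPairsAt_one]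
  rw [show i + 1 + 1 = i + 2 by ring]
  simp

theorem pvA_eq_flat (sections : List (List (String × String))) :
    create_transformer sections = pvFlatPairs (pvRowsOf sections) 0 := by
  unfold create_transformer
  rw [show (sections_to_list sections).1 = pvRowsOf sections from
      pvSections_to_list_fst sections [] []]
  set rows := pvRowsOf sections with hrows
  -- inner loop: appending singletons = ++ pvPairsAt
  have hinner : ∀ (i : Int) (acc : List (Int × Int)),
      (PySem.List.pyRange 0 (pvRowLen (PySem.List.pyGetD rows i (PvRow.head ""))) 1).foldl
        (fun tl j => tl ++ [(i, j)]) acc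
      = acc ++ pvPairsAt i (pvRowLen (PySem.List.pyGetD rows i (PvRow.head ""))) := by
    intro i acc
    rw [PySem.List.foldl_append_singleton_eq_map]
    rfl
  have houter :
      (PySem.List.pyRange 0 (rows.length : Int) 1).foldl
        (fun t_list i =>
          (PySem.List.pyRange 0 (pvRowLen (PySem.List.pyGetD rows i (PvRow.head ""))) 1).foldl
            (fun tl j => tl ++ [(i, j)]) t_list) ([] : List (Int × Int))
      = (PySem.List.pyRange 0 (rows.length : Int) 1).foldl
          (fun t_list i =>
            t_list ++ pvPairsAt i (pvRowLen (PySem.List.pyGetD rows i (PvRow.head "")))) [] := by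
    apply PySem.List.foldl_congr_mem
    intro acc i _
    exact hinner i acc
  rw [houter, PySem.List.foldl_append_eq_flatMap]
  rw [PySem.List.pyRange_one]
  simp only [Int.sub_zero, Int.toNat_natCast, List.flatMap_map]
  have hf : (fun k : Nat =>
      pvPairsAt (0 + (k : Int)) (pvRowLen (PySem.List.pyGetD rows (0 + (k : Int)) (PvRow.head "")))) =
      (fun k : Nat =>
        pvPairsAt (0 + (k : Int)) (pvRowLen (rows.getD k (PvRow.head "")))) := by
    funext k
    rw [show (0 + (k : Int)) = ((k : Nat) : Int) by ring, PySem.List.pyGetD_natCast]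
  rw [hf, pvFlat_nat rows 0]
  simp

theorem pvB_loop (sections : List (List (String × String)))
    (acc : List (Int × Int)) (i : Int) :
    (sections.foldl (fun (st : List (Int × Int) × Int) sec =>
        let t := ((PySem.Dict.mk sec).get? "text").getD ""
        (st.1 ++ [(st.2, 0)] ++
           (PySem.List.pyRange 0 (PySem.Str.len t) 1).map (fun j => (st.2 + 1, j)),
         st.2 + 2))
      (acc, i)).1 = acc ++ pvFlatPairs (pvRowsOf sections) i := by
  induction sections generalizing acc i with
  | nil => simp [pvRowsOf, pvFlatPairs]
  | cons s rest ih =>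
    simp only [List.foldl_cons]
    rw [ih]
    rw [show pvRowsOf (s :: rest)
          = PvRow.head (((PySem.Dict.mk s).get? "heading").getD "")
            :: PvRow.text (((PySem.Dict.mk s).get? "text").getD "")
            :: pvRowsOf rest from by simp [pvRowsOf]]
    rw [pvFlatPairs_cons2]
    simp [pvPairsAt, List.append_assoc]

theorem pvB_eq_flat (sections : List (List (String × String))) :
    create_transformer_alt sections = pvFlatPairs (pvRowsOf sections) 0 := by
  unfold create_transformer_alt
  rw [pvB_loop sections [] 0]
  simp

-- ===== VERDICT (by name: the statement is the Claim_ definition above) =====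
theorem create_transformer_spec : Claim_equal_create_transformer := by
  intro sections _ _
  unfold Spec_create_transformer
  rw [pvA_eq_flat, pvB_eq_flat]
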